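-- pv_equiv track=rewrite | github.com/Maksym637/tasks-python-2025 | hackerrank/python/removable_indices.py | getRemovableIndices
-- ===== SOURCE A (Python) =====
-- def getRemovableIndices(str1: str, str2: str) -> list[int]:
--     indices = []
--
--     for i in range(len(str1)):
--         new_str1 = str1[:i] + str1[i + 1 :]
--         if new_str1 == str2:
--             indices.append(i)
--
--     if not indices:
--         return [-1]
--
--     return indices
-- ===== SOURCE B (Python) =====
-- def getRemovableIndices(str1: str, str2: str) -> list[int]:
--     n = len(str1)
--     if n != len(str2) + 1:
--         return [-1]
--     p = 0
--     while p < n - 1 and str1[p] == str2[p]: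
--         p += 1
--     s = 0
--     while s < n - 1 and str1[n - 1 - s] == str2[n - 2 - s]:
--         s += 1
--     lo = max(0, n - 1 - s)
--     return list(range(lo, p + 1)) if lo <= p else [-1]
-- ===== Notes on version B (the rewrite author's own statement) =====
-- stated objective: faster
-- what changed: A tries every deletion index and rebuilds and compares the whole candidate string each time (O(n^2)); B computes the longest common prefix and longest common suffix in two linear scans and returns the contiguous range of valid indices directly.
import Mathlib
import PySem

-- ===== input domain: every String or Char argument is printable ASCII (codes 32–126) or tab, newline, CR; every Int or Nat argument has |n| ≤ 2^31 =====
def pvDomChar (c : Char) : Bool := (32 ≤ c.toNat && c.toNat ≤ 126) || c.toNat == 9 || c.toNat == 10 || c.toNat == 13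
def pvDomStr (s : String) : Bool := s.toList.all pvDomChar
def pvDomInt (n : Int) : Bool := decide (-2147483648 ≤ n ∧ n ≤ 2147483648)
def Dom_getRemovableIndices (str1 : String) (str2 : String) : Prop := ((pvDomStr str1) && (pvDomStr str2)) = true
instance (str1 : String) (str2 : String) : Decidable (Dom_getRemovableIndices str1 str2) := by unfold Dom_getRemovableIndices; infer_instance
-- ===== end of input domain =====

-- B replaces A's O(n^2) scan of all deletion candidates by one longest-common-prefix pass and one
-- longest-common-suffix pass: the valid indices form the contiguous range [n-1-suffix, prefix].

-- ===== PORT A =====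
def getRemovableIndices (str1 : String) (str2 : String) : List Int :=
  let indices := (PySem.List.pyRange 0 (PySem.Str.len str1) 1).foldl
      (fun acc i =>
        if PySem.List.slice str1.toList none (some i) ++ PySem.List.slice str1.toList (some (i + 1)) none
             = str2.toList
        then acc ++ [i] else acc) ([] : List Int)
  if indices = [] then [-1] else indices

-- ===== PORT B =====
-- the `while p < n-1 and str1[p] == str2[p]: p += 1` loop; `rem` counts the remaining iterations left
-- before p reaches n-1 (indices guarded by the loop condition are always in range, so getD is exact)
def pvPrefAux (xs ys : List Char) (p : Nat) : Nat → Nat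
  | 0 => p
  | rem + 1 => if xs.getD p ' ' = ys.getD p ' ' then pvPrefAux xs ys (p + 1) rem else p

-- the `while s < n-1 and str1[n-1-s] == str2[n-2-s]: s += 1` loop, same shape
def pvSufAux (xs ys : List Char) (n s : Nat) : Nat → Nat
  | 0 => s
  | rem + 1 => if xs.getD (n - 1 - s) ' ' = ys.getD (n - 2 - s) ' ' then pvSufAux xs ys n (s + 1) rem else s

def getRemovableIndices_alt (str1 : String) (str2 : String) : List Int :=
  let xs := str1.toList
  let ys := str2.toList
  let n := xs.length
  if n ≠ ys.length + 1 then [-1]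
  else
    let p := pvPrefAux xs ys 0 (n - 1)
    let s := pvSufAux xs ys n 0 (n - 1)
    let lo := n - 1 - s
    if lo ≤ p then PySem.List.pyRange (lo : Int) ((p : Int) + 1) 1 else [-1]

-- ===== PRECONDITION & SPEC =====
def Spec_getRemovableIndices (str1 : String) (str2 : String) (out : List Int) : Prop := out = getRemovableIndices_alt str1 str2
instance (str1 : String) (str2 : String) (out : List Int) : Decidable (Spec_getRemovableIndices str1 str2 out) := by unfold Spec_getRemovableIndices; infer_instance

-- ===== CLAIM (what is proved, stated in full; the proofs are below) =====
def Claim_equal_getRemovableIndices : Prop := ∀ (str1 : String) (str2 : String), Dom_getRemovableIndices str1 str2 → Spec_getRemovableIndices str1 str2 (getRemovableIndices str1 str2)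

-- ===== LEMMAS AND PROOFS =====

-- full characterisation of the prefix loop: it only advances over matching characters, stops at a
-- mismatch, and stays within [p, p+rem]
lemma pvPrefAux_spec (xs ys : List Char) : ∀ (rem p : Nat),
    p ≤ pvPrefAux xs ys p rem ∧ pvPrefAux xs ys p rem ≤ p + rem ∧
    (∀ j, p ≤ j → j < pvPrefAux xs ys p rem → xs.getD j ' ' = ys.getD j ' ') ∧
    (pvPrefAux xs ys p rem < p + rem →
      xs.getD (pvPrefAux xs ys p rem) ' ' ≠ ys.getD (pvPrefAux xs ys p rem) ' ') := by
  intro rem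
  induction rem with
  | zero =>
    intro p
    have e : pvPrefAux xs ys p 0 = p := rfl
    rw [e]
    exact ⟨le_refl _, by omega, fun j hj hjlt => by omega, fun hlt => by omega⟩
  | succ rem ih =>
    intro p
    by_cases h : xs.getD p ' ' = ys.getD p ' '
    · have e : pvPrefAux xs ys p (rem + 1) = pvPrefAux xs ys (p + 1) rem := by
        simp only [pvPrefAux]; rw [if_pos h]
      obtain ⟨h1, h2, h3, h4⟩ := ih (p + 1)
      rw [e]
      refine ⟨by omega, by omega, ?_, fun hlt => h4 (by omega)⟩
      intro j hj hjlt
      rcases Nat.eq_or_lt_of_le hj with rfl | hj'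
      · exact h
      · exact h3 j hj' hjlt
    · have e : pvPrefAux xs ys p (rem + 1) = p := by
        simp only [pvPrefAux]; rw [if_neg h]
      rw [e]
      exact ⟨le_refl _, by omega, fun j hj hjlt => by omega, fun _ => h⟩

-- take-prefixes agree iff all characters below k agree
lemma take_eq_iff_chars (xs ys : List Char) (k : Nat) (hk1 : k ≤ xs.length) (hk2 : k ≤ ys.length) :
    List.take k xs = List.take k ys ↔ ∀ j, j < k → xs.getD j ' ' = ys.getD j ' ' := by
  constructor
  · intro h j hj
    have h2 : xs[j]? = ys[j]? := by
      have h3 := congrArg (fun l => l[j]?) h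
      simpa [List.getElem?_take, hj] using h3
    rw [List.getD_eq_getElem xs ' ' (by omega), List.getD_eq_getElem ys ' ' (by omega)]
    rw [List.getElem?_eq_getElem (by omega : j < xs.length),
        List.getElem?_eq_getElem (by omega : j < ys.length)] at h2
    exact Option.some_injective _ h2
  · intro h
    apply List.ext_getElem?
    intro j
    by_cases hj : j < k
    · have hv := h j hj
      rw [List.getD_eq_getElem xs ' ' (by omega), List.getD_eq_getElem ys ' ' (by omega)] at hv
      simp [hj,
        List.getElem?_eq_getElem (show j < xs.length by omega),
        List.getElem?_eq_getElem (show j < ys.length by omega), hv]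
    · simp [hj]

-- take-prefixes agree iff k is at most the computed longest common prefix
lemma take_iff_le_pref (xs ys : List Char) (hlen : xs.length = ys.length + 1) (k : Nat)
    (hk : k ≤ ys.length) :
    List.take k xs = List.take k ys ↔ k ≤ pvPrefAux xs ys 0 ys.length := by
  obtain ⟨h1, h2, h3, h4⟩ := pvPrefAux_spec xs ys ys.length 0
  rw [take_eq_iff_chars xs ys k (by omega) hk]
  constructor
  · intro h
    by_contra hc
    have hc' : pvPrefAux xs ys 0 ys.length < k := Nat.lt_of_not_le hc
    exact h4 (by omega) (h _ (by omega))
  · intro h j hj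
    exact h3 j (by omega) (by omega)

-- the suffix loop is the prefix loop on the reversed strings
lemma pvSufAux_eq_pref (xs ys : List Char) (hlen : xs.length = ys.length + 1) :
    ∀ (rem s : Nat), s + rem ≤ ys.length →
      pvSufAux xs ys xs.length s rem = pvPrefAux xs.reverse ys.reverse s rem := by
  intro rem
  induction rem with
  | zero => intro s _; simp [pvSufAux, pvPrefAux]
  | succ rem ih =>
    intro s hs
    have hsm : s < ys.length := by omega
    have e1 : xs.getD (xs.length - 1 - s) ' ' = xs.reverse.getD s ' ' := by
      rw [List.getD_eq_getElem xs ' ' (by omega),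
          List.getD_eq_getElem xs.reverse ' ' (by simp; omega), List.getElem_reverse]
    have e2 : ys.getD (xs.length - 2 - s) ' ' = ys.reverse.getD s ' ' := by
      rw [List.getD_eq_getElem ys ' ' (by omega),
          List.getD_eq_getElem ys.reverse ' ' (by simp; omega), List.getElem_reverse]
      congr 1
      omega
    by_cases h : xs.reverse.getD s ' ' = ys.reverse.getD s ' '
    · simp only [pvSufAux, pvPrefAux, e1, e2, if_pos h]
      exact ih (s + 1) (by omega)
    · simp only [pvSufAux, pvPrefAux, e1, e2, if_neg h]

-- drop-suffixes agree iff the common suffix is long enough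
lemma drop_iff_le_suf (xs ys : List Char) (hlen : xs.length = ys.length + 1) (k : Nat)
    (hk : k ≤ ys.length) :
    List.drop (k + 1) xs = List.drop k ys ↔
      ys.length - k ≤ pvPrefAux xs.reverse ys.reverse 0 ys.length := by
  rw [← List.reverse_inj, List.reverse_drop, List.reverse_drop]
  have e : xs.length - (k + 1) = ys.length - k := by omega
  rw [e]
  have := take_iff_le_pref xs.reverse ys.reverse (by simp [hlen]) (ys.length - k)
    (by simp)
  simpa using this
-- deleting index k yields ys iff prefix and suffix both agree
lemma del_eq_iff (xs ys : List Char) (hlen : xs.length = ys.length + 1) (k : Nat)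
    (hk : k ≤ ys.length) :
    List.take k xs ++ List.drop (k + 1) xs = ys ↔
      (List.take k xs = List.take k ys ∧ List.drop (k + 1) xs = List.drop k ys) := by
  have hlt : (List.take k xs).length = k := by simp [List.length_take]; omega
  constructor
  · intro h
    constructor
    · rw [← h, List.take_left' hlt]
    · rw [← h, List.drop_left' hlt]
  · rintro ⟨h1, h2⟩
    rw [h1, h2, List.take_append_drop]

-- if the lengths do not fit, no deletion can produce ys
lemma del_ne_of_len (xs ys : List Char) (h : xs.length ≠ ys.length + 1) (k : Nat)
    (hk : k < xs.length) :
    List.take k xs ++ List.drop (k + 1) xs ≠ ys := by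
  intro he
  have hl := congrArg List.length he
  simp [List.length_take, List.length_drop] at hl
  omega

-- A's per-index test, with the Python slices unfolded into take/drop
lemma slice_pred_iff (xs ys : List Char) (i : Int) (h0 : 0 ≤ i) :
    (PySem.List.slice xs none (some i) ++ PySem.List.slice xs (some (i + 1)) none = ys) ↔
      (List.take i.toNat xs ++ List.drop (i.toNat + 1) xs = ys) := by
  rw [PySem.List.slice_to xs h0, PySem.List.slice_from xs (by omega : (0:Int) ≤ i + 1)]
  have e : (i + 1).toNat = i.toNat + 1 := by omega
  rw [e]

lemma main_eq (str1 str2 : String) :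
    getRemovableIndices str1 str2 = getRemovableIndices_alt str1 str2 := by
  unfold getRemovableIndices getRemovableIndices_alt
  simp only [PySem.Str.len_eq, PySem.List.foldl_append_ite_eq_filter, List.nil_append]
  set xs := str1.toList with hxs
  set ys := str2.toList with hys
  set F := List.filter
      (fun x => decide
        (PySem.List.slice xs none (some x) ++ PySem.List.slice xs (some (x + 1)) none = ys))
      (PySem.List.pyRange 0 (xs.length : Int) 1) with hF
  have hFmem : ∀ x : Int, x ∈ F ↔
      (0 ≤ x ∧ x < (xs.length : Int) ∧ List.take x.toNat xs ++ List.drop (x.toNat + 1) xs = ys) := by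
    intro x
    rw [hF, List.mem_filter, PySem.List.mem_pyRange_one]
    constructor
    · rintro ⟨⟨h0, h1⟩, hp⟩
      have hp' := of_decide_eq_true hp
      rw [slice_pred_iff xs ys x h0] at hp'
      exact ⟨h0, h1, hp'⟩
    · rintro ⟨h0, h1, hp⟩
      exact ⟨⟨h0, h1⟩, decide_eq_true ((slice_pred_iff xs ys x h0).mpr hp)⟩
  have hnodF : F.Nodup := hF ▸ List.Nodup.filter _ (PySem.List.nodup_pyRange_one _ _)
  have hpwF : F.Pairwise (fun a b : Int => a ≤ b) :=
    ((PySem.List.pairwise_lt_pyRange_one 0 (xs.length : Int)).sublist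
      (hF ▸ List.filter_sublist)).imp le_of_lt
  by_cases hlen : xs.length = ys.length + 1
  · have hm : xs.length - 1 = ys.length := by omega
    have hps : pvSufAux xs ys xs.length 0 (xs.length - 1)
        = pvPrefAux xs.reverse ys.reverse 0 ys.length := by
      rw [hm]; exact pvSufAux_eq_pref xs ys hlen ys.length 0 (by omega)
    have hpeq : pvPrefAux xs ys 0 (xs.length - 1) = pvPrefAux xs ys 0 ys.length := by rw [hm]
    set p := pvPrefAux xs ys 0 (xs.length - 1) with hpdef
    set s' := pvPrefAux xs.reverse ys.reverse 0 ys.length with hsdef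
    have hpm : p ≤ ys.length := by
      have := (pvPrefAux_spec xs ys (xs.length - 1) 0).2.1
      omega
    have hsm : s' ≤ ys.length := by
      have := (pvPrefAux_spec xs.reverse ys.reverse ys.length 0).2.1
      omega
    have hchar : ∀ x : Int, x ∈ F ↔ (((ys.length - s' : Nat) : Int) ≤ x ∧ x < (p : Int) + 1) := by
      intro x
      rw [hFmem x]
      constructor
      · rintro ⟨h0, h1, hdel⟩
        have hk : x.toNat ≤ ys.length := by omega
        rw [del_eq_iff xs ys hlen x.toNat hk] at hdel
        obtain ⟨ht, hd⟩ := hdel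
        rw [take_iff_le_pref xs ys hlen x.toNat hk, ← hpeq] at ht
        rw [drop_iff_le_suf xs ys hlen x.toNat hk, ← hsdef] at hd
        omega
      · rintro ⟨hlo, hhi⟩
        have h0 : 0 ≤ x := by omega
        have hk : x.toNat ≤ ys.length := by omega
        refine ⟨h0, by omega, ?_⟩
        rw [del_eq_iff xs ys hlen x.toNat hk,
            take_iff_le_pref xs ys hlen x.toNat hk, ← hpeq,
            drop_iff_le_suf xs ys hlen x.toNat hk, ← hsdef]
        omega
    rw [hps, hm, if_neg (by omega : ¬ xs.length ≠ ys.length + 1)]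
    by_cases hle : ys.length - s' ≤ p
    · have hne : F ≠ [] := by
        intro hnil
        have := (hchar ((ys.length - s' : Nat) : Int)).mpr (by constructor <;> omega)
        rw [hnil] at this
        exact (List.not_mem_nil) this
      rw [if_neg hne, if_pos hle]
      refine PySem.List.eq_of_perm_of_pairwise_le ?_ hpwF ?_
      · refine (List.perm_ext_iff_of_nodup hnodF (PySem.List.nodup_pyRange_one _ _)).mpr ?_
        intro x
        rw [hchar x, PySem.List.mem_pyRange_one]
      · exact (PySem.List.pairwise_lt_pyRange_one _ _).imp le_of_lt
    · have hFnil : F = [] := by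
        apply List.eq_nil_iff_forall_not_mem.mpr
        intro x hx
        rw [hchar x] at hx
        omega
      rw [hFnil, if_pos rfl, if_neg hle]
  · have hFnil : F = [] := by
      apply List.eq_nil_iff_forall_not_mem.mpr
      intro x hx
      rw [hFmem x] at hx
      exact del_ne_of_len xs ys hlen x.toNat (by omega) hx.2.2
    rw [hFnil, if_pos rfl, if_pos hlen]

-- ===== VERDICT (by name: the statement is the Claim_ definition above) =====
theorem getRemovableIndices_spec : Claim_equal_getRemovableIndices := by
  intro str1 str2 _
  unfold Spec_getRemovableIndices
  exact main_eq str1 str2
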